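-- pv_equiv track=rewrite | github.com/robertnesterodhiambo/robertnesterodhiambo-Data-analysis | R PROGRAMMING/indinaguy/pyhton nugget/assignment_3_1.py | find_nugget_combinations
-- ===== SOURCE A (Python) =====
-- def find_nugget_combinations(n):
--     combinations = []
--     for a in range(n // 6 + 1):
--         for b in range(n // 9 + 1):
--             for c in range(n // 22 + 1):
--                 if 6 * a + 9 * b + 22 * c == n:
--                     combinations.append({'Six_piece': a, 'Nine_piece': b, 'Twenty_two_piece': c})
--     return combinations
-- ===== SOURCE B (Python) =====
-- def find_nugget_combinations(n):
--     combinations = []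
--     a = 0
--     while 6 * a <= n:
--         b, rem = 0, n - 6 * a
--         while rem >= 0:
--             if rem % 22 == 0:
--                 combinations.append({'Six_piece': a, 'Nine_piece': b, 'Twenty_two_piece': rem // 22})
--             b += 1
--             rem -= 9
--         a += 1
--     return combinations
-- ===== Notes on version B (the rewrite author's own statement) =====
-- stated objective: faster
-- what changed: The triple nested range loop is replaced by two while loops over (a, b) that maintain the remainder n-6a-9b incrementally (decrementing by 9) and read c = rem // 22 off directly when the remainder is a nonnegative multiple of 22, eliminating the brute-force scan over c and the useless large-b iterations.
import Mathlib
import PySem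

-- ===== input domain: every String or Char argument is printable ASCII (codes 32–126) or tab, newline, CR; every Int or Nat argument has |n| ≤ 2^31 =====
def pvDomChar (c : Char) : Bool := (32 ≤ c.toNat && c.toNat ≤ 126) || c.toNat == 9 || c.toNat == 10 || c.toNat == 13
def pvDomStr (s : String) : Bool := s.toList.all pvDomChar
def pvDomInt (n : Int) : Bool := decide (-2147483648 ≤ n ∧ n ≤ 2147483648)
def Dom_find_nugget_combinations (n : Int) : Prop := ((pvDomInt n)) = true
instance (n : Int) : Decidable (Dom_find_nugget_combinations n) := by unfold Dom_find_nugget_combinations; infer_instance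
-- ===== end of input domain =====

-- B replaces A's triple nested range scan by two while loops over (a, b) that track the
-- remainder incrementally and read c off directly (asymptotically fewer iterations).

-- ===== PORT A =====
def find_nugget_combinations (n : Int) : List (List (String × Int)) :=
  (PySem.List.pyRange 0 (PySem.Int.floordiv n 6 + 1) 1).foldl (fun acc a =>
    (PySem.List.pyRange 0 (PySem.Int.floordiv n 9 + 1) 1).foldl (fun acc b =>
      (PySem.List.pyRange 0 (PySem.Int.floordiv n 22 + 1) 1).foldl (fun acc c =>
        if 6 * a + 9 * b + 22 * c = n then
          acc ++ [[("Six_piece", a), ("Nine_piece", b), ("Twenty_two_piece", c)]]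
        else acc) acc) acc) []

-- ===== PORT B =====
-- the 'while rem >= 0' loop of Source B, with state (row, b, rem)
def pvBLoop (a : Int) (row : List (List (String × Int))) (b rem : Int) :
    List (List (String × Int)) :=
  if _h : rem < 0 then row
  else
    pvBLoop a
      (if PySem.Int.mod rem 22 = 0 then
        row ++ [[("Six_piece", a), ("Nine_piece", b), ("Twenty_two_piece", PySem.Int.floordiv rem 22)]]
      else row)
      (b + 1) (rem - 9)
termination_by (rem + 1).toNat
decreasing_by omega

-- the outer 'while 6 * a <= n' loop of Source B, with state (combinations, a)
def pvALoop (n : Int) (acc : List (List (String × Int))) (a : Int) :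
    List (List (String × Int)) :=
  if _h : 6 * a > n then acc
  else pvALoop n (pvBLoop a acc 0 (n - 6 * a)) (a + 1)
termination_by (n - 6 * a + 1).toNat
decreasing_by omega

def find_nugget_combinations_alt (n : Int) : List (List (String × Int)) :=
  pvALoop n [] 0

-- ===== PRECONDITION & SPEC =====
def Spec_find_nugget_combinations (n : Int) (out : List (List (String × Int))) : Prop := out = find_nugget_combinations_alt n
instance (n : Int) (out : List (List (String × Int))) : Decidable (Spec_find_nugget_combinations n out) := by unfold Spec_find_nugget_combinations; infer_instance

-- ===== CLAIM (what is proved, stated in full; the proofs are below) =====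
def Claim_equal_find_nugget_combinations : Prop := ∀ (n : Int), Dom_find_nugget_combinations n → Spec_find_nugget_combinations n (find_nugget_combinations n)

-- ===== LEMMAS AND PROOFS =====

-- The filter of range(0,k) by "22*c = t" is the singleton [t/22] exactly when t is a nonnegative multiple of 22 (and t/22 < k).
theorem pv_filter_single (k t : Int) (hk : 0 ≤ t → 22 ∣ t → t / 22 < k) :
    (PySem.List.pyRange 0 k 1).filter (fun c => decide (22 * c = t)) =
      if 0 ≤ t ∧ t % 22 = 0 then [t / 22] else [] := by
  split_ifs with h
  · have hdvd : (22 : Int) ∣ t := Int.dvd_of_emod_eq_zero h.2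
    have hmem : t / 22 ∈ PySem.List.pyRange 0 k 1 := by
      rw [PySem.List.mem_pyRange_one]
      exact ⟨Int.ediv_nonneg h.1 (by norm_num), hk h.1 hdvd⟩
    have hpred : (fun c => decide (22 * c = t)) = (fun c => c == t / 22) := by
      funext c
      obtain ⟨q, hq⟩ := hdvd
      simp only [hq, Int.mul_ediv_cancel_left _ (by norm_num : (22:Int) ≠ 0)]
      by_cases hc : c = q
      · simp [hc]
      · show decide (22 * c = 22 * q) = decide (c = q)
        rw [decide_eq_decide]
        omega
    rw [hpred, List.filter_beq,
      List.count_eq_one_of_mem (PySem.List.nodup_pyRange_one 0 k) hmem]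
    simp
  · rw [List.filter_eq_nil_iff]
    intro c hc
    rw [PySem.List.mem_pyRange_one] at hc
    simp only [decide_eq_true_eq]
    intro hct
    have : (22:Int) ∣ t := ⟨c, by omega⟩
    have ht0 : 0 ≤ t := by omega
    exact h ⟨ht0, Int.emod_eq_zero_of_dvd this⟩

-- A's innermost c-loop computed directly, for a, b ≥ 0.
theorem pv_inner (n a b : Int) (ha : 0 ≤ a) (hb : 0 ≤ b) (acc : List (List (String × Int))) :
    (PySem.List.pyRange 0 (PySem.Int.floordiv n 22 + 1) 1).foldl (fun acc c =>
        if 6 * a + 9 * b + 22 * c = n then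
          acc ++ [[("Six_piece", a), ("Nine_piece", b), ("Twenty_two_piece", c)]]
        else acc) acc =
      acc ++ (if 0 ≤ n - 6 * a - 9 * b ∧ (n - 6 * a - 9 * b) % 22 = 0 then
        [[("Six_piece", a), ("Nine_piece", b), ("Twenty_two_piece", (n - 6 * a - 9 * b) / 22)]]
      else []) := by
  set rem := n - 6 * a - 9 * b with hrem
  have h22 : (0:Int) < 22 := by norm_num
  rw [PySem.List.foldl_append_ite
      (p := fun c => 6 * a + 9 * b + 22 * c = n)
      (f := fun c => [("Six_piece", a), ("Nine_piece", b), ("Twenty_two_piece", c)])]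
  have hp : (fun c => decide (6 * a + 9 * b + 22 * c = n)) = (fun c => decide (22 * c = rem)) := by
    funext c; rw [decide_eq_decide]; omega
  rw [hp, pv_filter_single]
  · split_ifs with h
    · simp
    · simp
  · intro ht hdvd
    rw [PySem.Int.floordiv_eq_ediv_of_pos h22]
    have : rem ≤ n := by omega
    have := Int.ediv_le_ediv h22 this
    omega

-- accumulator extraction for B's while loop
theorem pvBLoop_acc (a : Int) (k : ℕ) : ∀ (rem : Int), (rem + 1).toNat ≤ k →
    ∀ (b : Int) (row : List (List (String × Int))),
      pvBLoop a row b rem = row ++ pvBLoop a [] b rem := by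
  induction k with
  | zero =>
    intro rem hk b row
    have hneg : rem < 0 := by omega
    conv_lhs => rw [pvBLoop]
    conv_rhs => rw [pvBLoop]
    simp [hneg]
  | succ k ih =>
    intro rem hk b row
    by_cases hneg : rem < 0
    · conv_lhs => rw [pvBLoop]
      conv_rhs => rw [pvBLoop]
      simp [hneg]
    · conv_lhs => rw [pvBLoop]
      conv_rhs => rw [pvBLoop]
      rw [dif_neg hneg, dif_neg hneg]
      rw [ih (rem - 9) (by omega), ih (rem - 9) (by omega) (b + 1)
        (if PySem.Int.mod rem 22 = 0 then [] ++ [[("Six_piece", a), ("Nine_piece", b), ("Twenty_two_piece", PySem.Int.floordiv rem 22)]] else [])]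
      split_ifs with hm <;> simp

-- B's while loop equals the flatMap over the remaining b-range of A (after pv_inner), for 0 ≤ b0.
theorem pv_bloop_eq (n a rest : Int) (hrest : rest ≤ n) (k : ℕ) :
    ∀ (b0 : Int), 0 ≤ b0 → (rest - 9 * b0 + 1).toNat ≤ k →
    (PySem.List.pyRange b0 (PySem.Int.floordiv n 9 + 1) 1).flatMap (fun b =>
        if 0 ≤ rest - 9 * b ∧ (rest - 9 * b) % 22 = 0 then
          [[("Six_piece", a), ("Nine_piece", b), ("Twenty_two_piece", (rest - 9 * b) / 22)]]
        else []) =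
      pvBLoop a [] b0 (rest - 9 * b0) := by
  induction k with
  | zero =>
    intro b0 hb0 hk
    have hneg : rest - 9 * b0 < 0 := by omega
    rw [pvBLoop, dif_pos hneg, List.flatMap_eq_nil_iff]
    intro b hb
    have := (PySem.List.mem_pyRange_one.mp hb).1
    have hc : ¬ (0 ≤ rest - 9 * b ∧ (rest - 9 * b) % 22 = 0) := by
      intro hcc; omega
    rw [if_neg hc]
  | succ k ih =>
    intro b0 hb0 hk
    by_cases hneg : rest - 9 * b0 < 0
    · rw [pvBLoop, dif_pos hneg, List.flatMap_eq_nil_iff]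
      intro b hb
      have := (PySem.List.mem_pyRange_one.mp hb).1
      have hc : ¬ (0 ≤ rest - 9 * b ∧ (rest - 9 * b) % 22 = 0) := by
        intro hcc; omega
      rw [if_neg hc]
    · have h9 : (0:Int) < 9 := by norm_num
      rw [show PySem.List.pyRange b0 (PySem.Int.floordiv n 9 + 1) 1 =
            b0 :: PySem.List.pyRange (b0 + 1) (PySem.Int.floordiv n 9 + 1) 1 from
          PySem.List.pyRange_one_cons (by
            have : b0 ≤ PySem.Int.floordiv n 9 := by
              rw [PySem.Int.floordiv_eq_ediv_of_pos h9, Int.le_ediv_iff_mul_le h9]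
              omega
            omega),
        List.flatMap_cons, ih (b0 + 1) (by omega) (by omega)]
      conv_rhs => rw [pvBLoop]
      rw [dif_neg hneg]
      rw [pvBLoop_acc a ((rest - 9 * (b0 + 1)) + 1).toNat (rem := rest - 9 * b0 - 9) (by omega)]
      have hmod : PySem.Int.mod (rest - 9 * b0) 22 = (rest - 9 * b0) % 22 :=
        PySem.Int.mod_eq_emod_of_pos (by norm_num)
      have hdiv : PySem.Int.floordiv (rest - 9 * b0) 22 = (rest - 9 * b0) / 22 :=
        PySem.Int.floordiv_eq_ediv_of_pos (by norm_num)
      rw [hmod, hdiv, show rest - 9 * b0 - 9 = rest - 9 * (b0 + 1) by ring]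
      split_ifs with h1 h2 h2
      · simp
      · omega
      · omega
      · simp

-- accumulator extraction for B's outer while loop
theorem pvALoop_acc (n : Int) (k : ℕ) : ∀ (a0 : Int), (n - 6 * a0 + 1).toNat ≤ k →
    ∀ (acc : List (List (String × Int))),
      pvALoop n acc a0 = acc ++ pvALoop n [] a0 := by
  induction k with
  | zero =>
    intro a0 hk acc
    have hgt : 6 * a0 > n := by omega
    conv_lhs => rw [pvALoop]
    conv_rhs => rw [pvALoop]
    simp [hgt]
  | succ k ih =>
    intro a0 hk acc
    by_cases hgt : 6 * a0 > n
    · conv_lhs => rw [pvALoop]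
      conv_rhs => rw [pvALoop]
      simp [hgt]
    · conv_lhs => rw [pvALoop]
      conv_rhs => rw [pvALoop]
      rw [dif_neg hgt, dif_neg hgt]
      rw [pvBLoop_acc a0 ((n - 6 * a0) + 1).toNat (rem := n - 6 * a0) le_rfl,
        ih (a0 + 1) (by omega), ih (a0 + 1) (by omega) (pvBLoop a0 [] 0 (n - 6 * a0))]
      simp

-- B's outer while loop equals the flatMap over the remaining a-range, for 0 ≤ a0.
theorem pv_arec_eq (n : Int) (k : ℕ) : ∀ (a0 : Int), 0 ≤ a0 → (n - 6 * a0 + 1).toNat ≤ k →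
    (PySem.List.pyRange a0 (PySem.Int.floordiv n 6 + 1) 1).flatMap (fun a =>
        (PySem.List.pyRange 0 (PySem.Int.floordiv n 9 + 1) 1).flatMap (fun b =>
          if 0 ≤ n - 6 * a - 9 * b ∧ (n - 6 * a - 9 * b) % 22 = 0 then
            [[("Six_piece", a), ("Nine_piece", b), ("Twenty_two_piece", (n - 6 * a - 9 * b) / 22)]]
          else [])) =
      pvALoop n [] a0 := by
  have h6 : (0:Int) < 6 := by norm_num
  induction k with
  | zero =>
    intro a0 ha0 hk
    have hgt : 6 * a0 > n := by omega
    have hnil : PySem.List.pyRange a0 (PySem.Int.floordiv n 6 + 1) 1 = [] := by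
      apply PySem.List.pyRange_one_eq_nil
      have : PySem.Int.floordiv n 6 < a0 := by
        rw [PySem.Int.floordiv_eq_ediv_of_pos h6, Int.ediv_lt_iff_lt_mul h6]
        nlinarith
      omega
    rw [hnil, List.flatMap_nil]
    conv_rhs => rw [pvALoop]
    rw [dif_pos hgt]
  | succ k ih =>
    intro a0 ha0 hk
    by_cases hgt : 6 * a0 > n
    · have hnil : PySem.List.pyRange a0 (PySem.Int.floordiv n 6 + 1) 1 = [] := by
        apply PySem.List.pyRange_one_eq_nil
        have : PySem.Int.floordiv n 6 < a0 := by
          rw [PySem.Int.floordiv_eq_ediv_of_pos h6, Int.ediv_lt_iff_lt_mul h6]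
          nlinarith
        omega
      rw [hnil, List.flatMap_nil]
      conv_rhs => rw [pvALoop]
      rw [dif_pos hgt]
    · rw [show PySem.List.pyRange a0 (PySem.Int.floordiv n 6 + 1) 1 =
            a0 :: PySem.List.pyRange (a0 + 1) (PySem.Int.floordiv n 6 + 1) 1 from
          PySem.List.pyRange_one_cons (by
            have : a0 ≤ PySem.Int.floordiv n 6 := by
              rw [PySem.Int.floordiv_eq_ediv_of_pos h6, Int.le_ediv_iff_mul_le h6]
              omega
            omega),
        List.flatMap_cons, ih (a0 + 1) (by omega) (by omega)]
      conv_rhs => rw [pvALoop]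
      rw [dif_neg hgt]
      rw [pvALoop_acc n ((n - 6 * (a0 + 1)) + 1).toNat (a0 + 1) le_rfl
        (pvBLoop a0 [] 0 (n - 6 * a0))]
      congr 1
      have := pv_bloop_eq n a0 (n - 6 * a0) (by omega) ((n - 6 * a0) + 1).toNat 0 le_rfl (by omega)
      simp only [mul_zero, sub_zero] at this
      exact this

-- ===== VERDICT (by name: the statement is the Claim_ definition above) =====
theorem find_nugget_combinations_spec : Claim_equal_find_nugget_combinations := by
  intro n _
  unfold Spec_find_nugget_combinations find_nugget_combinations find_nugget_combinations_alt
  calc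
    (PySem.List.pyRange 0 (PySem.Int.floordiv n 6 + 1) 1).foldl (fun acc a =>
        (PySem.List.pyRange 0 (PySem.Int.floordiv n 9 + 1) 1).foldl (fun acc b =>
          (PySem.List.pyRange 0 (PySem.Int.floordiv n 22 + 1) 1).foldl (fun acc c =>
            if 6 * a + 9 * b + 22 * c = n then
              acc ++ [[("Six_piece", a), ("Nine_piece", b), ("Twenty_two_piece", c)]]
            else acc) acc) acc) []
      = (PySem.List.pyRange 0 (PySem.Int.floordiv n 6 + 1) 1).foldl (fun acc a =>
          acc ++ (PySem.List.pyRange 0 (PySem.Int.floordiv n 9 + 1) 1).flatMap (fun b =>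
            if 0 ≤ n - 6 * a - 9 * b ∧ (n - 6 * a - 9 * b) % 22 = 0 then
              [[("Six_piece", a), ("Nine_piece", b), ("Twenty_two_piece", (n - 6 * a - 9 * b) / 22)]]
            else [])) [] := by
        apply PySem.List.foldl_congr_mem
        intro acc a hamem
        have ha : 0 ≤ a := (PySem.List.mem_pyRange_one.mp hamem).1
        calc
          _ = (PySem.List.pyRange 0 (PySem.Int.floordiv n 9 + 1) 1).foldl (fun acc b =>
                acc ++ (if 0 ≤ n - 6 * a - 9 * b ∧ (n - 6 * a - 9 * b) % 22 = 0 then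
                  [[("Six_piece", a), ("Nine_piece", b), ("Twenty_two_piece", (n - 6 * a - 9 * b) / 22)]]
                else [])) acc := by
              apply PySem.List.foldl_congr_mem
              intro acc' b hbmem
              exact pv_inner n a b ha (PySem.List.mem_pyRange_one.mp hbmem).1 acc'
          _ = _ := by rw [PySem.List.foldl_append_eq_flatMap]
    _ = [] ++ (PySem.List.pyRange 0 (PySem.Int.floordiv n 6 + 1) 1).flatMap (fun a =>
          (PySem.List.pyRange 0 (PySem.Int.floordiv n 9 + 1) 1).flatMap (fun b =>
            if 0 ≤ n - 6 * a - 9 * b ∧ (n - 6 * a - 9 * b) % 22 = 0 then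
              [[("Six_piece", a), ("Nine_piece", b), ("Twenty_two_piece", (n - 6 * a - 9 * b) / 22)]]
            else [])) := by rw [PySem.List.foldl_append_eq_flatMap]
    _ = pvALoop n [] 0 := by
        rw [List.nil_append]
        exact pv_arec_eq n ((n + 1).toNat) 0 le_rfl (by omega)
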